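-- pv_equiv track=rewrite | github.com/yoan34/calendrier-2024 | calcul_calendar.py | fact_prime
-- ===== SOURCE A (Python) =====
-- def fact_prime(n):
--     i = 2
--     facteurs = []
--     while i * i <= n:
--         while n % i == 0:
--             facteurs.append(i)
--             n = n // i
--         i += 1
--     if n > 1:
--         facteurs.append(n)
--     degré = len(facteurs)
--     return degré
-- ===== SOURCE B (Python) =====
-- def fact_prime(n):
--     # Recursive: strip off the smallest divisor (necessarily prime), found by a
--     # fresh linear search from 2 each time; no factor list, no inner division loop.
--     if n <= 1:
--         return 0
--     d = 2
--     while d * d <= n and n % d != 0: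
--         d += 1
--     if d * d > n:
--         return 1  # no divisor up to sqrt(n): n is prime
--     return 1 + fact_prime(n // d)
-- ===== Notes on version B (the rewrite author's own statement) =====
-- stated objective: alternative
-- what changed: B replaces A's iterative nested-while factorisation (outer i*i<=n sweep with an inner divide-out loop, an accumulated factor list and a final 'if n>1' tail branch) by a recursion that at each level searches afresh from 2 for the smallest divisor and counts 1 + fact_prime(n//d), with primality detected by the search passing sqrt(n); no list and no tail branch.
import Mathlib
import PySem

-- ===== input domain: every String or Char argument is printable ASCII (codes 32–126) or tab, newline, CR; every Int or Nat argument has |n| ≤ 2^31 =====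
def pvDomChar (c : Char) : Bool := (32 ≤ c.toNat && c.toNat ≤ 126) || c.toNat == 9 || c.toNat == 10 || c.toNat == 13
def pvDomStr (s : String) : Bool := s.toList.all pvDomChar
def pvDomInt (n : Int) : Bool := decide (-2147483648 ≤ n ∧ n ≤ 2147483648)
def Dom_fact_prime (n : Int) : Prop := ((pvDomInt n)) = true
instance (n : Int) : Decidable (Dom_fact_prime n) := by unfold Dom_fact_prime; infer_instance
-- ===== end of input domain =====

-- B replaces A's nested-while/factor-list/tail-branch loop by a recursion that strips
-- the smallest divisor (found by a fresh search from 2) at each level; alternative, not faster.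

-- termination helper for the division steps (the guards 0 < n / 2 ≤ i on the A-side inner
-- loop are totality guards only: the Python loop is only ever entered with them true)
theorem pvFloordivBounds (n i : Int) (hn : 0 < n) (hi : 2 ≤ i) :
    0 ≤ PySem.Int.floordiv n i ∧ PySem.Int.floordiv n i < n := by
  rw [PySem.Int.floordiv_eq_ediv_of_pos (by omega)]
  refine ⟨Int.ediv_nonneg hn.le (by omega), ?_⟩
  apply Int.ediv_lt_of_lt_mul (by omega)
  nlinarith

-- ===== PORT A =====
-- inner while: while n % i == 0: facteurs.append(i); n = n // i
def factInnerA (i n : Int) (facteurs : List Int) : List Int × Int :=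
  if h : 0 < n ∧ 2 ≤ i ∧ PySem.Int.mod n i = 0 then
    factInnerA i (PySem.Int.floordiv n i) (facteurs ++ [i])
  else (facteurs, n)
termination_by n.toNat
decreasing_by
  have := pvFloordivBounds n i h.1 h.2.1; omega

theorem factInnerA_snd_le (i n : Int) (f : List Int) : (factInnerA i n f).2 ≤ n := by
  fun_induction factInnerA i n f with
  | case1 n f h ih =>
      have := pvFloordivBounds n i h.1 h.2.1; omega
  | case2 n f h => simp

-- outer while: while i*i <= n, then the tail 'if n > 1'
def factOuterA (i n : Int) (facteurs : List Int) : List Int :=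
  if h : 2 ≤ i ∧ i * i ≤ n then
    factOuterA (i + 1) (factInnerA i n facteurs).2 (factInnerA i n facteurs).1
  else if 1 < n then facteurs ++ [n] else facteurs
termination_by (n + 1 - i).toNat
decreasing_by
  have h1 := factInnerA_snd_le i n facteurs
  have h2 : i ≤ i * i := le_mul_of_one_le_left (by omega) (by omega)
  omega

def fact_prime (n : Int) : Int := ((factOuterA 2 n []).length : Int)

-- ===== PORT B =====
-- B's search loop: while d*d <= n and n % d != 0: d += 1   (returns the final d)
def factSearchB (d n : Int) : Int :=
  if h : 2 ≤ d ∧ d * d ≤ n ∧ ¬ PySem.Int.mod n d = 0 then factSearchB (d + 1) n else d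
termination_by (n + 1 - d).toNat
decreasing_by
  have : d ≤ d * d := le_mul_of_one_le_left (by omega) (by omega)
  omega

theorem factSearchB_ge (d n : Int) : d ≤ factSearchB d n := by
  fun_induction factSearchB d n with
  | case1 h ih => omega
  | case2 h => omega

def fact_prime_alt (n : Int) : Int :=
  if h : n ≤ 1 then 0
  else
    if n < factSearchB 2 n * factSearchB 2 n then 1
    else 1 + fact_prime_alt (PySem.Int.floordiv n (factSearchB 2 n))
termination_by n.toNat
decreasing_by
  have h2 : (2 : Int) ≤ factSearchB 2 n := factSearchB_ge 2 n
  have := pvFloordivBounds n (factSearchB 2 n) (by omega) h2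
  omega

-- ===== PRECONDITION & SPEC =====
def Spec_fact_prime (n : Int) (out : Int) : Prop := out = fact_prime_alt n
instance (n : Int) (out : Int) : Decidable (Spec_fact_prime n out) := by unfold Spec_fact_prime; infer_instance

-- ===== CLAIM (what is proved, stated in full; the proofs are below) =====
def Claim_equal_fact_prime : Prop := ∀ (n : Int), Dom_fact_prime n → Spec_fact_prime n (fact_prime n)

-- ===== LEMMAS AND PROOFS =====

-- Ω(n) with multiplicity, the common value both programs compute
def pvOm (n : Int) : Int := ((ArithmeticFunction.cardFactors n.toNat : Nat) : Int)

theorem pvOm_small (n : Int) (h : n ≤ 1) : pvOm n = 0 := by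
  unfold pvOm
  have : n.toNat = 0 ∨ n.toNat = 1 := by omega
  rcases this with h0 | h0 <;> rw [h0] <;> simp

-- the smallest divisor ≥ 2 of n is prime
theorem pvMinDvdPrime (n r : Int) (hr : 2 ≤ r) (hdvd : r ∣ n)
    (hinv : ∀ e : Int, 2 ≤ e → e < r → ¬ e ∣ n) : Nat.Prime r.toNat := by
  rw [Nat.prime_def_minFac]
  refine ⟨by omega, ?_⟩
  by_contra hne
  have hple := Nat.minFac_le (show 0 < r.toNat by omega)
  have hp := Nat.minFac_prime (show r.toNat ≠ 1 by omega)
  have hlt : r.toNat.minFac < r.toNat := lt_of_le_of_ne hple hne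
  have hdr : (r.toNat.minFac : Int) ∣ r := by
    have h0 : ((r.toNat.minFac : Nat) : Int) ∣ ((r.toNat : Nat) : Int) :=
      Int.natCast_dvd_natCast.mpr (Nat.minFac_dvd r.toNat)
    rwa [Int.toNat_of_nonneg (by omega)] at h0
  have h2 : (2 : Int) ≤ (r.toNat.minFac : Int) := by exact_mod_cast hp.two_le
  have hl : (r.toNat.minFac : Int) < r := by
    have : (r.toNat.minFac : Int) < (r.toNat : Int) := by exact_mod_cast hlt
    rwa [Int.toNat_of_nonneg (by omega)] at this
  exact hinv _ h2 hl (hdr.trans hdvd)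

-- if n > 1 has no divisor in [2, i) and n < i*i, then n is prime
theorem pvPrimeOfNoDiv (n i : Int) (h1 : 1 < n) (hi : 2 ≤ i) (hsq : n < i * i)
    (hinv : ∀ e : Int, 2 ≤ e → e < i → ¬ e ∣ n) : Nat.Prime n.toNat := by
  by_contra hnp
  have hp := Nat.minFac_prime (show n.toNat ≠ 1 by omega)
  have hsqle : n.toNat.minFac * n.toNat.minFac ≤ n.toNat := by
    have := Nat.minFac_sq_le_self (show 0 < n.toNat by omega) hnp
    simpa [pow_two] using this
  have h2p : (2 : Int) ≤ (n.toNat.minFac : Int) := by exact_mod_cast hp.two_le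
  have hpd : (n.toNat.minFac : Int) ∣ n := by
    have h0 : ((n.toNat.minFac : Nat) : Int) ∣ ((n.toNat : Nat) : Int) :=
      Int.natCast_dvd_natCast.mpr (Nat.minFac_dvd n.toNat)
    rwa [Int.toNat_of_nonneg (by omega)] at h0
  have hppn : (n.toNat.minFac : Int) * (n.toNat.minFac : Int) ≤ n := by
    have h0 : ((n.toNat.minFac * n.toNat.minFac : Nat) : Int) ≤ ((n.toNat : Nat) : Int) := by
      exact_mod_cast hsqle
    push_cast at h0
    rwa [Int.toNat_of_nonneg (by omega)] at h0
  have hlt : (n.toNat.minFac : Int) < i := by nlinarith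
  exact hinv _ h2p hlt hpd

-- dividing a prime d out of n removes exactly one counted factor
theorem pvOmStep (n d : Int) (hn : 0 < n) (hd : 2 ≤ d) (hdvd : d ∣ n)
    (hp : Nat.Prime d.toNat) : pvOm n = 1 + pvOm (PySem.Int.floordiv n d) := by
  obtain ⟨q, rfl⟩ := hdvd
  have hq : 0 < q := by nlinarith
  rw [PySem.Int.floordiv_eq_ediv_of_pos (by omega), Int.mul_ediv_cancel_left q (by omega)]
  unfold pvOm
  rw [Int.toNat_mul (by omega) (by omega),
    ArithmeticFunction.cardFactors_mul (by omega) (by omega),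
    ArithmeticFunction.cardFactors_apply_prime hp]
  push_cast
  omega

-- A's inner loop: counts Ω-steps, leaves a positive divisor of n not divisible by i,
-- and preserves 'no divisor in [2, i)'
theorem innerA_om : ∀ (k : Nat) (i n : Int) (f : List Int), 2 ≤ i → 0 < n → n.toNat ≤ k →
    (∀ e : Int, 2 ≤ e → e < i → ¬ e ∣ n) →
    ((factInnerA i n f).1.length : Int) + pvOm (factInnerA i n f).2 = f.length + pvOm n ∧
      0 < (factInnerA i n f).2 ∧ ¬ i ∣ (factInnerA i n f).2 ∧
      (∀ e : Int, 2 ≤ e → e < i → ¬ e ∣ (factInnerA i n f).2) := by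
  intro k
  induction k with
  | zero => intro i n f hi hn hk; omega
  | succ k ih =>
    intro i n f hi hn hk hinv
    by_cases hd : PySem.Int.mod n i = 0
    · have hguard : 0 < n ∧ 2 ≤ i ∧ PySem.Int.mod n i = 0 := ⟨hn, hi, hd⟩
      have hdvd : i ∣ n := (PySem.Int.mod_eq_zero_iff_dvd n i).mp hd
      have hp := pvMinDvdPrime n i hi hdvd hinv
      have hstep := pvOmStep n i hn hi hdvd hp
      have hfb := pvFloordivBounds n i hn hi
      have hqd : PySem.Int.floordiv n i ∣ n := by
        obtain ⟨q, rfl⟩ := hdvd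
        rw [PySem.Int.floordiv_eq_ediv_of_pos (by omega),
          Int.mul_ediv_cancel_left q (by omega)]
        exact dvd_mul_left q i
      have hq0 : 0 < PySem.Int.floordiv n i := by
        rcases hfb with ⟨ha, _⟩
        rcases lt_or_eq_of_le ha with h0 | h0
        · exact h0
        · exfalso
          obtain ⟨q, rfl⟩ := hdvd
          have : PySem.Int.floordiv (i * q) i = q := by
            rw [PySem.Int.floordiv_eq_ediv_of_pos (by omega)]
            exact Int.mul_ediv_cancel_left q (by omega)
          rw [this] at h0
          nlinarith
      have hinv' : ∀ e : Int, 2 ≤ e → e < i → ¬ e ∣ PySem.Int.floordiv n i :=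
        fun e h2 hl hdv => hinv e h2 hl (hdv.trans hqd)
      obtain ⟨H1, H2, H3, H4⟩ :=
        ih i (PySem.Int.floordiv n i) (f ++ [i]) hi hq0 (by omega) hinv'
      rw [factInnerA, dif_pos hguard]
      refine ⟨?_, H2, H3, H4⟩
      simp only [List.length_append, List.length_cons, List.length_nil] at H1
      push_cast at H1 ⊢
      omega
    · rw [factInnerA, dif_neg (by tauto)]
      refine ⟨?_, hn, ?_, hinv⟩
      · show ((f.length : Int)) + pvOm n = f.length + pvOm n
        ring
      · show ¬ i ∣ n
        intro hdv
        exact hd ((PySem.Int.mod_eq_zero_iff_dvd n i).mpr hdv)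

-- A's outer loop once i*i exceeds n: the tail branch contributes Ω of the remainder
theorem outerA_exit (i n : Int) (f : List Int) (hi : 2 ≤ i) (hn : 0 < n)
    (hsq : ¬ i * i ≤ n) (hinv : ∀ e : Int, 2 ≤ e → e < i → ¬ e ∣ n) :
    ((factOuterA i n f).length : Int) = f.length + pvOm n := by
  rw [factOuterA, dif_neg (by tauto)]
  by_cases h1 : 1 < n
  · have hp := pvPrimeOfNoDiv n i h1 hi (by omega) hinv
    have hom : pvOm n = 1 := by
      unfold pvOm
      rw [ArithmeticFunction.cardFactors_apply_prime hp]
      norm_num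
    rw [if_pos h1, hom]
    simp only [List.length_append, List.length_cons, List.length_nil]
    push_cast
    omega
  · have hn1 : n = 1 := by omega
    rw [if_neg h1, pvOm_small n (by omega)]
    omega

-- A's outer loop computes Ω of the remaining n
theorem outerA_om : ∀ (k : Nat) (i n : Int) (f : List Int), 2 ≤ i → 0 < n →
    (n + 1 - i).toNat ≤ k → (∀ e : Int, 2 ≤ e → e < i → ¬ e ∣ n) →
    ((factOuterA i n f).length : Int) = f.length + pvOm n := by
  intro k
  induction k with
  | zero =>
    intro i n f hi hn hk hinv
    have hin : n < i := by omega
    exact outerA_exit i n f hi hn (by nlinarith) hinv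
  | succ k ih =>
    intro i n f hi hn hk hinv
    by_cases hsq : i * i ≤ n
    · have hin : i ≤ n := le_trans (le_mul_of_one_le_left (by omega) (by omega)) hsq
      obtain ⟨H1, H2, H3, H4⟩ := innerA_om n.toNat i n f hi hn (le_refl _) hinv
      have hle : (factInnerA i n f).2 ≤ n := factInnerA_snd_le i n f
      have hinv' : ∀ e : Int, 2 ≤ e → e < i + 1 → ¬ e ∣ (factInnerA i n f).2 := by
        intro e h2 hl hdv
        rcases eq_or_lt_of_le (show e ≤ i by omega) with heq | hlt
        · exact H3 (heq ▸ hdv)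
        · exact H4 e h2 hlt hdv
      have IH := ih (i + 1) (factInnerA i n f).2 (factInnerA i n f).1
        (by omega) H2 (by omega) hinv'
      rw [factOuterA, dif_pos ⟨hi, hsq⟩]
      omega
    · exact outerA_exit i n f hi hn hsq hinv

-- B's search: the result is ≥ d, n has no divisor strictly below it, and if it is
-- within the square-root bound it divides n
theorem searchB_props : ∀ (k : Nat) (d n : Int), 2 ≤ d → 0 < n → (n + 1 - d).toNat ≤ k →
    (∀ e : Int, 2 ≤ e → e < d → ¬ e ∣ n) →
    (∀ e : Int, 2 ≤ e → e < factSearchB d n → ¬ e ∣ n) ∧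
    (factSearchB d n * factSearchB d n ≤ n → factSearchB d n ∣ n) := by
  intro k
  induction k with
  | zero =>
    intro d n hd hn hk hinv
    have hdn : n < d := by omega
    rw [factSearchB, dif_neg (by intro ⟨_, h, _⟩; nlinarith)]
    exact ⟨hinv, fun hle => by nlinarith⟩
  | succ k ih =>
    intro d n hd hn hk hinv
    by_cases hg : 2 ≤ d ∧ d * d ≤ n ∧ ¬ PySem.Int.mod n d = 0
    · have hnd : ¬ d ∣ n := fun hdv => hg.2.2 ((PySem.Int.mod_eq_zero_iff_dvd n d).mpr hdv)
      have hinv' : ∀ e : Int, 2 ≤ e → e < d + 1 → ¬ e ∣ n := by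
        intro e h2 hl hdv
        rcases eq_or_lt_of_le (show e ≤ d by omega) with heq | hlt
        · exact hnd (heq ▸ hdv)
        · exact hinv e h2 hlt hdv
      have hdd : d ≤ d * d := le_mul_of_one_le_left (by omega) (by omega)
      rw [factSearchB, dif_pos hg]
      exact ih (d + 1) n (by omega) hn (by omega) hinv'
    · rw [factSearchB, dif_neg hg]
      refine ⟨hinv, fun hle => ?_⟩
      rcases not_and_or.mp hg with h | h
      · omega
      · rcases not_and_or.mp h with h' | h'
        · omega
        · exact (PySem.Int.mod_eq_zero_iff_dvd n d).mp (not_not.mp h')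

-- B computes Ω
theorem altB_om : ∀ (k : Nat) (n : Int), n.toNat ≤ k → fact_prime_alt n = pvOm n := by
  intro k
  induction k with
  | zero =>
    intro n hk
    rw [fact_prime_alt, dif_pos (by omega), pvOm_small n (by omega)]
  | succ k ih =>
    intro n hk
    by_cases h1 : n ≤ 1
    · rw [fact_prime_alt, dif_pos h1, pvOm_small n h1]
    · have hr2 : (2 : Int) ≤ factSearchB 2 n := factSearchB_ge 2 n
      obtain ⟨P1, P2⟩ := searchB_props (n + 1 - 2).toNat 2 n (le_refl 2) (by omega)
        (le_refl _) (fun e h2 hl => absurd hl (by omega))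
      rw [fact_prime_alt, dif_neg h1]
      by_cases hlt : n < factSearchB 2 n * factSearchB 2 n
      · have hp := pvPrimeOfNoDiv n (factSearchB 2 n) (by omega) hr2 hlt P1
        rw [if_pos hlt]
        unfold pvOm
        rw [ArithmeticFunction.cardFactors_apply_prime hp]
        norm_num
      · have hdvd := P2 (by omega)
        have hp := pvMinDvdPrime n (factSearchB 2 n) hr2 hdvd P1
        have hstep := pvOmStep n (factSearchB 2 n) (by omega) hr2 hdvd hp
        have hfb := pvFloordivBounds n (factSearchB 2 n) (by omega) hr2
        rw [if_neg hlt, ih (PySem.Int.floordiv n (factSearchB 2 n)) (by omega)]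
        omega

-- ===== VERDICT (by name: the statement is the Claim_ definition above) =====
theorem fact_prime_spec : Claim_equal_fact_prime := by
  intro n _
  unfold Spec_fact_prime fact_prime
  by_cases h2 : 2 ≤ n
  · have hA := outerA_om (n + 1 - 2).toNat 2 n [] (le_refl 2) (by omega) (le_refl _)
      (fun e h2e hl => absurd hl (by omega))
    have hB := altB_om n.toNat n (le_refl _)
    rw [hA, hB]
    simp
  · rw [factOuterA, dif_neg (by omega), if_neg (by omega),
      fact_prime_alt, dif_pos (by omega)]
    simp
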